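-- pv_equiv track=rewrite | github.com/LeeChaeY/Algorithm | 프로그래머스/1/42840. 모의고사/Python_풀이.py | solution
-- ===== SOURCE A (Python) =====
-- def solution(answers):
--     answer = []
--     ans=[0,0,0]
--     one = [1,2,3,4,5]*(len(answers)//5) + [1,2,3,4,5][0:len(answers)%5]
--     two = [2,1,2,3,2,4,2,5]*(len(answers)//8) + [2,1,2,3,2,4,2,5][0:len(answers)%8]
--     three = [3,3,1,1,2,2,4,4,5,5]*(len(answers)//10) + [3,3,1,1,2,2,4,4,5,5][0:len(answers)%10]
--     for i in range(len(answers)):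
--         if answers[i]==one[i]:
--             ans[0]+=1
--         if answers[i]==two[i]:
--             ans[1]+=1
--         if answers[i]==three[i]:
--             ans[2]+=1
--     answer += [i+1 for i in range(len(ans)) if ans[i]==max(ans)]
--     return answer
-- ===== SOURCE B (Python) =====
-- def solution(answers):
--     pats = [[1, 2, 3, 4, 5],
--             [2, 1, 2, 3, 2, 4, 2, 5],
--             [3, 3, 1, 1, 2, 2, 4, 4, 5, 5]]
--     # one histogram pass: count answers per (position mod 40, value); 40 = lcm(5, 8, 10)
--     cnt = {}
--     for i, a in enumerate(answers):
--         k = (i % 40, a)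
--         cnt[k] = cnt.get(k, 0) + 1
--     # each score is 40 histogram lookups, independent of len(answers)
--     scores = [sum(cnt.get((r, p[r % len(p)]), 0) for r in range(40))
--               for p in pats]
--     best = max(scores)
--     return [k + 1 for k in range(3) if scores[k] == best]
-- ===== Notes on version B (the rewrite author's own statement) =====
-- stated objective: alternative
-- what changed: B replaces A's per-index scan against three tiled answer-length pattern lists by a single histogram pass that counts answers per (index mod 40, value) key (40 = lcm of the pattern periods), after which each score is 40 dictionary lookups independent of the input length.
import Mathlib
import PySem

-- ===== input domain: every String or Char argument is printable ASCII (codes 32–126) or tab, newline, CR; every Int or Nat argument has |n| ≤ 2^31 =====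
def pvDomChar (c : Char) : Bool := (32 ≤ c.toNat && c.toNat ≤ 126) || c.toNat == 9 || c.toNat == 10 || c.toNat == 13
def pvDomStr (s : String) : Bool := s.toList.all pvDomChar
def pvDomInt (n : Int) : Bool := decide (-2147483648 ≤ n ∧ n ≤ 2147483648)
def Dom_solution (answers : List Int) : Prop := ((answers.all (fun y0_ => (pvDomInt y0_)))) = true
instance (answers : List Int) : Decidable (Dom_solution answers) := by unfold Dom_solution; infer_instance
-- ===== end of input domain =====

-- B replaces A's scan against three tiled answer-length lists by one histogram pass keyed by
-- (index mod 40, value); each score is then 40 dictionary lookups (alternative; same asymptotic cost).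

-- ===== PORT A =====
-- Python list repetition 'pat * k'
def pvRepeat (pat : List Int) (k : Nat) : List Int := (List.replicate k pat).flatten

def solution (answers : List Int) : List Int :=
  let n := answers.length
  -- one = [1,2,3,4,5]*(n//5) + [1,2,3,4,5][0:n%5]   (n//5, n%5 on Nat agree with Python's // and % for nonnegative operands)
  let one := pvRepeat [1,2,3,4,5] (n / 5) ++ PySem.List.slice ([1,2,3,4,5] : List Int) (some 0) (some ((n % 5 : Nat) : Int))
  let two := pvRepeat [2,1,2,3,2,4,2,5] (n / 8) ++ PySem.List.slice ([2,1,2,3,2,4,2,5] : List Int) (some 0) (some ((n % 8 : Nat) : Int))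
  let three := pvRepeat [3,3,1,1,2,2,4,4,5,5] (n / 10) ++ PySem.List.slice ([3,3,1,1,2,2,4,4,5,5] : List Int) (some 0) (some ((n % 10 : Nat) : Int))
  -- ans = [0,0,0] with ans[0]+=1 / ans[1]+=1 / ans[2]+=1 kept as a triple of the three counters;
  -- all indexing (answers[i], one[i], two[i], three[i]) is in range so pyGetD is exact
  let ans := (PySem.List.pyRange 0 (n : Int) 1).foldl
    (fun (s : Int × Int × Int) i =>
      ((if PySem.List.pyGetD answers i 0 = PySem.List.pyGetD one i 0 then s.1 + 1 else s.1),
       (if PySem.List.pyGetD answers i 0 = PySem.List.pyGetD two i 0 then s.2.1 + 1 else s.2.1),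
       (if PySem.List.pyGetD answers i 0 = PySem.List.pyGetD three i 0 then s.2.2 + 1 else s.2.2)))
    (0, 0, 0)
  let ansl : List Int := [ans.1, ans.2.1, ans.2.2]
  let m := PySem.List.maxD ansl id 0      -- max(ans); ansl is nonempty so the default is never used
  [] ++ ((PySem.List.pyRange 0 3 1).filter (fun i => PySem.List.pyGetD ansl i 0 = m)).map (fun i => i + 1)

-- ===== PORT B =====
-- 'for i, a in enumerate(answers): k = (i % 40, a); cnt[k] = cnt.get(k, 0) + 1'
def pvHist (answers : List Int) : PySem.Dict (Int × Int) Int :=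
  -- the key k = (i % 40, a) is inlined
  (PySem.List.enumerate answers).foldl
    (fun d p =>
      d.insert (PySem.Int.mod p.1 40, p.2) (d.getD (PySem.Int.mod p.1 40, p.2) 0 + 1))
    PySem.Dict.empty

-- 'sum(cnt.get((r, p[r % len(p)]), 0) for r in range(40))'
def pvHistScore (cnt : PySem.Dict (Int × Int) Int) (p : List Int) : Int :=
  (PySem.List.pyRange 0 40 1).foldl
    (fun s r => s + cnt.getD (r, PySem.List.pyGetD p (PySem.Int.mod r (p.length : Int)) 0) 0) 0

def solution_alt (answers : List Int) : List Int :=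
  let pats : List (List Int) := [[1,2,3,4,5], [2,1,2,3,2,4,2,5], [3,3,1,1,2,2,4,4,5,5]]
  let cnt := pvHist answers
  let scores := pats.map (pvHistScore cnt)
  let best := PySem.List.maxD scores id 0   -- max(scores); scores is nonempty
  ((PySem.List.pyRange 0 3 1).filter (fun k => PySem.List.pyGetD scores k 0 = best)).map (fun k => k + 1)

-- ===== PRECONDITION & SPEC =====
def Spec_solution (answers : List Int) (out : List Int) : Prop := out = solution_alt answers
instance (answers : List Int) (out : List Int) : Decidable (Spec_solution answers out) := by unfold Spec_solution; infer_instance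

-- ===== CLAIM (what is proved, stated in full; the proofs are below) =====
def Claim_equal_solution : Prop := ∀ (answers : List Int), Dom_solution answers → Spec_solution answers (solution answers)

-- ===== LEMMAS AND PROOFS =====

-- repeated pattern indexes modularly
lemma repeat_getD (pat : List Int) (c k : Nat) (h : k < c * pat.length) :
    (pvRepeat pat c).getD k 0 = pat.getD (k % pat.length) 0 := by
  induction c generalizing k with
  | zero => simp at h
  | succ c ih =>
    rw [Nat.succ_mul] at h
    simp only [pvRepeat, List.replicate_succ, List.flatten_cons]
    by_cases hk : k < pat.length
    · rw [List.getD_append _ _ _ _ hk, Nat.mod_eq_of_lt hk]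
    · rw [Nat.not_lt] at hk
      rw [List.getD_append_right _ _ _ _ hk]
      have hlt : k - pat.length < c * pat.length := by omega
      have := ih (k - pat.length) hlt
      simp only [pvRepeat] at this
      rw [this, Nat.mod_eq_sub_mod hk]

lemma length_pvRepeat (pat : List Int) (c : Nat) : (pvRepeat pat c).length = c * pat.length := by
  simp [pvRepeat, List.length_flatten, List.map_replicate]

-- A's tiled list indexes modularly
lemma tile_getD (pat : List Int) (hm : pat ≠ []) (n k : Nat) (hk : k < n) :
    (pvRepeat pat (n / pat.length) ++ pat.take (n % pat.length)).getD k 0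
      = pat.getD (k % pat.length) 0 := by
  have hm0 : 0 < pat.length := List.length_pos_iff.mpr hm
  have hdm := Nat.div_add_mod n pat.length
  have hA : n / pat.length * pat.length = pat.length * (n / pat.length) := Nat.mul_comm _ _
  by_cases h1 : k < n / pat.length * pat.length
  · rw [List.getD_append _ _ _ _ (by rw [length_pvRepeat]; exact h1)]
    exact repeat_getD pat _ k h1
  · rw [Nat.not_lt] at h1
    rw [List.getD_append_right _ _ _ _ (by rw [length_pvRepeat]; exact h1), length_pvRepeat]
    have hr : k - n / pat.length * pat.length < n % pat.length := by omega
    have hlt2 := Nat.mod_lt n hm0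
    have hkm : k % pat.length = k - n / pat.length * pat.length := by
      conv_lhs => rw [show k = (k - n / pat.length * pat.length) + pat.length * (n / pat.length) by omega]
      rw [Nat.add_mul_mod_self_left]
      exact Nat.mod_eq_of_lt (by omega)
    rw [hkm, List.getD_eq_getElem?_getD, List.getElem?_take, if_pos hr,
        ← List.getD_eq_getElem?_getD]

-- split the triple-counter fold into three independent folds
lemma foldl_triple (p q r : Int → Prop) [DecidablePred p] [DecidablePred q] [DecidablePred r]
    (l : List Int) (a b c : Int) :
    l.foldl (fun (s : Int × Int × Int) i =>
        ((if p i then s.1 + 1 else s.1),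
         (if q i then s.2.1 + 1 else s.2.1),
         (if r i then s.2.2 + 1 else s.2.2))) (a, b, c)
      = (l.foldl (fun s i => if p i then s + 1 else s) a,
         l.foldl (fun s i => if q i then s + 1 else s) b,
         l.foldl (fun s i => if r i then s + 1 else s) c) := by
  induction l generalizing a b c with
  | nil => rfl
  | cons x xs ih => simp only [List.foldl_cons, ih]

-- one counter of A's loop over a tiled list equals a modular-indexed countP over enumerate
lemma a_score_eq (answers pat : List Int) (m : Nat) (hlen : pat.length = m) (hm : pat ≠ []) :
    (PySem.List.pyRange 0 (answers.length : Int) 1).foldl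
      (fun (s : Int) i =>
        if PySem.List.pyGetD answers i 0
            = PySem.List.pyGetD (pvRepeat pat (answers.length / m)
                ++ PySem.List.slice pat (some 0) (some ((answers.length % m : Nat) : Int))) i 0
          then s + 1 else s) 0
      = ((PySem.List.enumerate answers).countP
          (fun q => q.2 = PySem.List.pyGetD pat (PySem.Int.mod q.1 (m : Int)) 0) : Int) := by
  subst hlen
  rw [PySem.List.foldl_ite_add_one
        (p := fun i => PySem.List.pyGetD answers i 0
              = PySem.List.pyGetD (pvRepeat pat (answers.length / pat.length)
                  ++ PySem.List.slice pat (some 0) (some ((answers.length % pat.length : Nat) : Int))) i 0),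
      zero_add]
  rw [PySem.List.enumerate_eq_map_pyRange answers 0, List.countP_map]
  simp only [PySem.List.len_eq]
  congr 1
  apply List.countP_congr
  intro x hx
  rw [PySem.List.mem_pyRange_one] at hx
  obtain ⟨k, rfl⟩ : ∃ k : Nat, x = (k : Int) := ⟨x.toNat, by omega⟩
  have hk : k < answers.length := by exact_mod_cast hx.2
  simp only [Function.comp, PySem.List.slice_zero_start, PySem.List.slice_to_natCast,
    PySem.List.pyGetD_natCast, PySem.Int.mod_natCast]
  rw [tile_getD pat hm answers.length k hk]

-- the histogram value at a key is the count of that key in the mapped enumerate list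
lemma hist_getD (answers : List Int) (v : Int × Int) :
    (pvHist answers).getD v 0
      = (((PySem.List.enumerate answers).map
            (fun p => (PySem.Int.mod p.1 40, p.2))).count v : Int) := by
  unfold pvHist
  rw [show ((PySem.List.enumerate answers).foldl
        (fun d p =>
          d.insert (PySem.Int.mod p.1 40, p.2) (d.getD (PySem.Int.mod p.1 40, p.2) 0 + 1))
        PySem.Dict.empty)
      = (((PySem.List.enumerate answers).map (fun p => (PySem.Int.mod p.1 40, p.2))).foldl
          (fun (d : PySem.Dict (Int × Int) Int) x => d.insert x (d.getD x 0 + 1))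
          PySem.Dict.empty) from by rw [List.foldl_map]]
  rw [PySem.Dict.getD_foldl_insert_add_one]
  simp

-- summing the indicator of one pair over a nodup list of keys containing its first component
lemma sum_indicator (f : Int → Int) (q : Int × Int) (R : List Int) (hn : R.Nodup)
    (hq : q.1 ∈ R) :
    (R.map (fun r => if q = (r, f r) then (1 : Int) else 0)).sum
      = if q.2 = f q.1 then 1 else 0 := by
  induction R with
  | nil => simp at hq
  | cons r R ih =>
    rw [List.nodup_cons] at hn
    rw [List.map_cons, List.sum_cons]
    by_cases hr : q.1 = r
    · have hz : (R.map (fun r => if q = (r, f r) then (1 : Int) else 0)).sum = 0 := by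
        apply List.sum_eq_zero
        intro x hx
        rw [List.mem_map] at hx
        obtain ⟨r', hr', rfl⟩ := hx
        have : q.1 ≠ r' := fun h => hn.1 (hr ▸ h ▸ hr')
        simp [Prod.ext_iff, this]
      rw [hz, add_zero]
      subst hr
      by_cases hc : q.2 = f q.1 <;> simp [Prod.ext_iff, hc]
    · have hq' : q.1 ∈ R := (List.mem_cons.mp hq).resolve_left hr
      rw [ih hn.2 hq']
      have : (if q = (r, f r) then (1 : Int) else 0) = 0 := by simp [Prod.ext_iff, hr]
      rw [this, zero_add]

-- Σ_{r<40} count L (r, f r) = countP (λ q, q.2 = f q.1) L when every first component lies in [0,40)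
lemma sum_count_eq_countP (f : Int → Int) (L : List (Int × Int))
    (h : ∀ q ∈ L, 0 ≤ q.1 ∧ q.1 < 40) :
    ((PySem.List.pyRange 0 40 1).map (fun r => (L.count (r, f r) : Int))).sum
      = (L.countP (fun q => q.2 = f q.1) : Int) := by
  induction L with
  | nil => simp
  | cons q L ih =>
    have hq := h q (by simp)
    have hL : ∀ p ∈ L, 0 ≤ p.1 ∧ p.1 < 40 := fun p hp => h p (List.mem_cons_of_mem _ hp)
    have hsplit : ((PySem.List.pyRange 0 40 1).map (fun r => ((q :: L).count (r, f r) : Int)))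
        = ((PySem.List.pyRange 0 40 1).map
            (fun r => (L.count (r, f r) : Int) + (if q = (r, f r) then 1 else 0))) := by
      apply List.map_congr_left
      intro r _
      rw [List.count_cons]
      by_cases hqr : q = (r, f r) <;> simp [hqr]
    rw [hsplit, PySem.List.sum_map_add_int, ih hL,
        sum_indicator f q (PySem.List.pyRange 0 40 1) (PySem.List.nodup_pyRange_one 0 40)
          (by rw [PySem.List.mem_pyRange_one]; exact hq),
        List.countP_cons]
    by_cases hc : q.2 = f q.1 <;> simp [hc]

-- B's histogram score equals the modular-indexed countP over enumerate
lemma b_score_eq (answers pat : List Int) (m : Nat) (hlen : pat.length = m)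
    (hdvd : m ∣ 40) :
    pvHistScore (pvHist answers) pat
      = ((PySem.List.enumerate answers).countP
          (fun q => q.2 = PySem.List.pyGetD pat (PySem.Int.mod q.1 (m : Int)) 0) : Int) := by
  subst hlen
  unfold pvHistScore
  rw [PySem.List.foldl_add
        (g := fun r => (pvHist answers).getD
          (r, PySem.List.pyGetD pat (PySem.Int.mod r (pat.length : Int)) 0) 0),
      zero_add]
  rw [List.map_congr_left (fun r _ => hist_getD answers
        (r, PySem.List.pyGetD pat (PySem.Int.mod r (pat.length : Int)) 0))]
  rw [sum_count_eq_countP (fun r => PySem.List.pyGetD pat (PySem.Int.mod r (pat.length : Int)) 0)]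
  · rw [List.countP_map]
    apply congrArg
    apply List.countP_congr
    intro p hp
    rw [PySem.List.mem_enumerate_iff] at hp
    obtain ⟨k, hklt, rfl⟩ := hp
    simp only [Function.comp, zero_add]
    rw [show (40 : Int) = ((40 : Nat) : Int) from rfl, PySem.Int.mod_natCast,
        PySem.Int.mod_natCast, PySem.Int.mod_natCast, Nat.mod_mod_of_dvd k hdvd]
  · intro q hq
    rw [List.mem_map] at hq
    obtain ⟨p, _, rfl⟩ := hq
    exact ⟨PySem.Int.mod_nonneg p.1 (by norm_num), PySem.Int.mod_lt p.1 (by norm_num)⟩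

theorem solution_eq_alt (answers : List Int) : solution answers = solution_alt answers := by
  unfold solution solution_alt
  simp only
  rw [foldl_triple]
  rw [a_score_eq answers [1,2,3,4,5] 5 rfl (by simp),
      a_score_eq answers [2,1,2,3,2,4,2,5] 8 rfl (by simp),
      a_score_eq answers [3,3,1,1,2,2,4,4,5,5] 10 rfl (by simp)]
  rw [show ([[1,2,3,4,5], [2,1,2,3,2,4,2,5], [3,3,1,1,2,2,4,4,5,5]] : List (List Int)).map
        (pvHistScore (pvHist answers))
      = [pvHistScore (pvHist answers) [1,2,3,4,5],
         pvHistScore (pvHist answers) [2,1,2,3,2,4,2,5],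
         pvHistScore (pvHist answers) [3,3,1,1,2,2,4,4,5,5]] from rfl]
  rw [b_score_eq answers [1,2,3,4,5] 5 rfl (by norm_num),
      b_score_eq answers [2,1,2,3,2,4,2,5] 8 rfl (by norm_num),
      b_score_eq answers [3,3,1,1,2,2,4,4,5,5] 10 rfl (by norm_num)]
  rfl

-- ===== VERDICT (by name: the statement is the Claim_ definition above) =====
theorem solution_spec : Claim_equal_solution := by
  intro answers _
  unfold Spec_solution
  exact solution_eq_alt answers
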